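-- pv_equiv track=rewrite | github.com/Chakana-Bankai/deckcards-python-purplewizard | game/systems/gameplay_rules.py | normalized_combat_deck
-- ===== SOURCE A (Python) =====
-- from typing import Iterable
--
-- def normalized_combat_deck(deck_ids: Iterable[str], fallback_card_id: str, target_size: int) -> list[str]:
--     """Return a deterministic combat deck list with a minimum target size.
--
--     This keeps run-level deck composition intact while safely padding short decks
--     for combat-only flow requirements.
--     """
--     src = [str(x) for x in list(deck_ids or []) if str(x).strip()]
--     if not src:
--         src = [str(fallback_card_id)]
--     target = max(1, int(target_size or 1))
--     if len(src) >= target: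
--         return src[:]
--
--     out = src[:]
--     idx = 0
--     while len(out) < target:
--         out.append(src[idx % len(src)])
--         idx += 1
--     return out
-- ===== SOURCE B (Python) =====
-- def normalized_combat_deck(deck_ids, fallback_card_id, target_size):
--     src = [str(x) for x in list(deck_ids or []) if str(x).strip()]
--     if not src:
--         src = [str(fallback_card_id)]
--     target = max(1, int(target_size or 1))
--     if len(src) >= target:
--         return src[:]
--     k = -(-target // len(src))  # ceiling division
--     return (src * k)[:target]
-- ===== Notes on version B (the rewrite author's own statement) =====
-- stated objective: idiomatic
-- what changed: The element-by-element while-loop that appends one cycled card at a time is replaced by tiling: compute the needed repetition count with ceiling division, materialize src*k in one step and truncate to target.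
import Mathlib
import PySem

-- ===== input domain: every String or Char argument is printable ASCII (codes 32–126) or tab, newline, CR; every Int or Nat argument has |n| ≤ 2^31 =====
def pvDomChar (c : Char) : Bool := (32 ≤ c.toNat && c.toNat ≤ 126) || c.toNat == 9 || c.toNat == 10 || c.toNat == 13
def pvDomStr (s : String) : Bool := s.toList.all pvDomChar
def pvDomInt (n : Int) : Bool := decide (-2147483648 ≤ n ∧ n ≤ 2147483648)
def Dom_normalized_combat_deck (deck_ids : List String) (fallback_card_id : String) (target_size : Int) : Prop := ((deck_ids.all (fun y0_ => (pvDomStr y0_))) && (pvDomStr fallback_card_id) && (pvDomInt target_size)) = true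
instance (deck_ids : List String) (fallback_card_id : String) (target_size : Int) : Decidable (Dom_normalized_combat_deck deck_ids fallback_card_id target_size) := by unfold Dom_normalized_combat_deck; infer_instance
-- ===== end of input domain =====

-- B replaces A's one-element-at-a-time padding loop with tile-then-truncate
-- (ceiling-division repetition count, then slice); objective: idiomatic, same cost.

-- ===== PORT A =====
-- the while-loop of A: while len(out) < target: out.append(src[idx % len(src)]); idx += 1
def pvLoopA (src : List String) (target : Int) (out : List String) (idx : Int) : List String :=
  if h : (out.length : Int) < target then
    pvLoopA src target (out ++ [((PySem.List.pyGet? src (PySem.Int.mod idx (src.length : Int))).getD "")]) (idx + 1)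
  else out
termination_by (target - out.length).toNat
decreasing_by simp only [List.length_append, List.length_cons, List.length_nil]; omega

def normalized_combat_deck (deck_ids : List String) (fallback_card_id : String) (target_size : Int) : List String :=
  -- src = [str(x) for x in list(deck_ids or []) if str(x).strip()]  (str(x) = x on strings; deck_ids or [] = deck_ids for a list)
  let src := deck_ids.filter (fun x => PySem.Str.strip x ≠ "")
  let src := if src = [] then [fallback_card_id] else src
  let target := max 1 (if target_size = 0 then 1 else target_size)
  if (src.length : Int) ≥ target then src
  else pvLoopA src target src 0

-- ===== PORT B =====
def normalized_combat_deck_alt (deck_ids : List String) (fallback_card_id : String) (target_size : Int) : List String :=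
  let src := deck_ids.filter (fun x => PySem.Str.strip x ≠ "")
  let src := if src = [] then [fallback_card_id] else src
  let target := max 1 (if target_size = 0 then 1 else target_size)
  if (src.length : Int) ≥ target then src
  else
    let k := -(PySem.Int.floordiv (-target) (src.length : Int))  -- ceiling division
    (List.flatten (List.replicate k.toNat src)).take target.toNat  -- (src * k)[:target], target ≥ 0

-- ===== PRECONDITION & SPEC =====
def Spec_normalized_combat_deck (deck_ids : List String) (fallback_card_id : String) (target_size : Int) (out : List String) : Prop := out = normalized_combat_deck_alt deck_ids fallback_card_id target_size
instance (deck_ids : List String) (fallback_card_id : String) (target_size : Int) (out : List String) : Decidable (Spec_normalized_combat_deck deck_ids fallback_card_id target_size out) := by unfold Spec_normalized_combat_deck; infer_instance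

-- ===== CLAIM (what is proved, stated in full; the proofs are below) =====
def Claim_equal_normalized_combat_deck : Prop := ∀ (deck_ids : List String) (fallback_card_id : String) (target_size : Int), Dom_normalized_combat_deck deck_ids fallback_card_id target_size → Spec_normalized_combat_deck deck_ids fallback_card_id target_size (normalized_combat_deck deck_ids fallback_card_id target_size)

-- ===== LEMMAS AND PROOFS =====

-- the cycled element function both sides produce
def pvCyc (src : List String) (i : Nat) : String := src.getD (i % src.length) ""

lemma pvCyc_eq_pyGet (src : List String) (hn : 0 < src.length) (j : Nat) :
    ((PySem.List.pyGet? src (PySem.Int.mod (j : Int) (src.length : Int))).getD "") = pvCyc src j := by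
  have hm : PySem.Int.mod (j : Int) (src.length : Int) = ((j % src.length : Nat) : Int) := by
    exact_mod_cast PySem.Int.mod_natCast j src.length
  rw [hm, PySem.List.pyGet?_natCast]
  have hlt : j % src.length < src.length := Nat.mod_lt _ hn
  simp [hlt, pvCyc, List.getD]

lemma pvSrc_eq_map (src : List String) :
    src = (List.range src.length).map (pvCyc src) := by
  apply List.ext_getElem
  · simp
  · intro i h1 h2
    simp only [List.getElem_map, List.getElem_range]
    simp [pvCyc, List.getD, Nat.mod_eq_of_lt h1, List.getElem?_eq_getElem h1]

lemma pvFlatten_replicate (src : List String) (k : Nat) :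
    List.flatten (List.replicate k src) = (List.range (k * src.length)).map (pvCyc src) := by
  induction k with
  | zero => simp
  | succ k ih =>
    have hrep : List.replicate (k+1) src = List.replicate k src ++ [src] := by
      rw [← List.replicate_succ']
    rw [hrep, List.flatten_append, ih]
    have hr : List.range ((k+1) * src.length)
        = List.range (k * src.length) ++ (List.range src.length).map (k * src.length + ·) := by
      rw [Nat.succ_mul, List.range_add]
    rw [hr, List.map_append, List.map_map]
    congr 1
    simp only [List.flatten_cons, List.flatten_nil, List.append_nil]
    conv_lhs => rw [pvSrc_eq_map src]
    apply List.map_congr_left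
    intro i hi
    simp only [Function.comp_apply, pvCyc]
    have hmod : (k * src.length + i) % src.length = i % src.length := by
      rw [Nat.add_comm, Nat.add_mul_mod_self_right]
    rw [hmod]

-- A's loop, started at out = (range (n+j)).map cyc with idx = j, ends at (range (max (n+j) T)).map cyc
lemma pvLoopA_eq (src : List String) (hn : 0 < src.length) (T : Nat) :
    ∀ fuel j, T ≤ src.length + j + fuel →
      pvLoopA src (T : Int) ((List.range (src.length + j)).map (pvCyc src)) (j : Int)
        = (List.range (max (src.length + j) T)).map (pvCyc src) := by
  intro fuel
  induction fuel with
  | zero =>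
    intro j hj
    rw [pvLoopA, dif_neg]
    · have hmax : max (src.length + j) T = src.length + j := by omega
      rw [hmax]
    · simp only [List.length_map, List.length_range]; push_cast; omega
  | succ fuel ih =>
    intro j hj
    rw [pvLoopA]
    by_cases h : src.length + j < T
    · rw [dif_pos (by simp only [List.length_map, List.length_range]; push_cast; omega)]
      have he : ((PySem.List.pyGet? src (PySem.Int.mod (j : Int) (src.length : Int))).getD "")
          = pvCyc src (src.length + j) := by
        rw [pvCyc_eq_pyGet src hn j]
        simp [pvCyc, Nat.add_mod_left]
      rw [he]
      have hout : (List.range (src.length + j)).map (pvCyc src) ++ [pvCyc src (src.length + j)]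
          = (List.range (src.length + (j+1))).map (pvCyc src) := by
        rw [show src.length + (j+1) = (src.length + j) + 1 by omega, List.range_succ, List.map_append]
        simp
      have hcast : ((j : Int) + 1) = ((j + 1 : Nat) : Int) := by push_cast; ring
      rw [hout, hcast, ih (j+1) (by omega)]
      have hmax : max (src.length + (j + 1)) T = max (src.length + j) T := by omega
      rw [hmax]
    · rw [dif_neg (by simp only [List.length_map, List.length_range]; push_cast; omega)]
      have hmax : max (src.length + j) T = src.length + j := by omega
      rw [hmax]

-- the shared tail of both ports, for a fixed nonempty src and arbitrary target
lemma pv_core (src : List String) (hn : 0 < src.length) (target : Int) :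
    (if (src.length : Int) ≥ target then src else pvLoopA src target src 0)
      = (if (src.length : Int) ≥ target then src
         else (List.flatten (List.replicate (-(PySem.Int.floordiv (-target) (src.length : Int))).toNat src)).take target.toNat) := by
  by_cases hge : (src.length : Int) ≥ target
  · rw [if_pos hge, if_pos hge]
  · rw [if_neg hge, if_neg hge]
    have hlt : (src.length : Int) < target := by omega
    obtain ⟨T, hT⟩ : ∃ T : Nat, target = (T : Int) := ⟨target.toNat, by omega⟩
    have hnT : src.length < T := by omega
    set q := PySem.Int.floordiv (-target) (src.length : Int) with hq
    have hfd : q = (-target) / (src.length : Int) :=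
      PySem.Int.floordiv_eq_ediv_of_pos (by exact_mod_cast hn)
    have hqm : q * (src.length : Int) ≤ -target := by
      rw [hfd]; exact Int.ediv_mul_le (-target) (by positivity)
    have hqneg : q < 0 := by
      rcases lt_or_ge q 0 with h | h
      · exact h
      · exfalso
        have h2 : (0:Int) ≤ q * (src.length : Int) := mul_nonneg h (by positivity)
        omega
    have hq1 : (T : Int) ≤ (-q) * (src.length : Int) := by
      have hneg : (-q) * (src.length : Int) = -(q * (src.length : Int)) := by ring
      omega
    have hcast : (((-q).toNat * src.length : Nat) : Int) = (-q) * (src.length : Int) := by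
      push_cast [Int.toNat_of_nonneg (show (0:Int) ≤ -q by omega)]
      ring
    rw [hT]
    have hA : pvLoopA src ((T : Nat) : Int) src 0 = (List.range T).map (pvCyc src) := by
      have h0 := pvLoopA_eq src hn T (T - src.length) 0 (by omega)
      simp only [Nat.add_zero, Nat.cast_zero] at h0
      rw [← pvSrc_eq_map src] at h0
      rw [h0]
      have hmax : max src.length T = T := by omega
      rw [hmax]
    have hB : (List.flatten (List.replicate (-q).toNat src)).take ((T : Int)).toNat
        = (List.range T).map (pvCyc src) := by
      rw [pvFlatten_replicate, ← List.map_take, List.take_range]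
      have hmin : min (((T : Nat) : Int)).toNat ((-q).toNat * src.length) = T := by omega
      rw [hmin]
    rw [hA, ← hB]

-- ===== VERDICT (by name: the statement is the Claim_ definition above) =====
theorem normalized_combat_deck_spec : Claim_equal_normalized_combat_deck := by
  intro deck_ids fallback_card_id target_size _
  unfold Spec_normalized_combat_deck normalized_combat_deck normalized_combat_deck_alt
  apply pv_core
  split
  · simp
  · rename_i h; exact List.length_pos_iff.mpr h
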